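-- pv_equiv track=rewrite | github.com/007seann/Generation-of-Supervised-Sentiment-Metrics-for-Return-and-Volatility-Prediction-from-10-K-Filings | seanchoi/airflow/plugins/common/sec10k_item1a_extractor.py | find_max_difference_pair
-- ===== SOURCE A (Python) =====
-- def find_max_difference_pair(first_heading_position, second_heading_position):
--     try:
--         max_difference = 0
--         max_difference_pair = None
--
--         for first_heading in first_heading_position:
--             valid_second_headings = [second_heading for second_heading in second_heading_position if second_heading[0] > first_heading[0]]
--             if not valid_second_headings:
--                 continue
--
--             closest_start = min(valid_second_headings, key=lambda x: x[0])
--             difference = closest_start[0] - first_heading[0]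
--
--             if difference > max_difference and difference > 1000:  # Limit difference to be larger than 1000
--                 max_difference = difference
--                 max_difference_pair = (first_heading[1], closest_start[0])
--
--         return max_difference_pair, None  # Return None for error status
--
--     except Exception as e:
--         return None, str(e)
-- ===== SOURCE B (Python) =====
-- def find_max_difference_pair(first_heading_position, second_heading_position):
--     # Sort the second-heading start offsets once, then answer each
--     # "smallest start greater than pos" query by binary search.
--     starts = sorted(s for s, _ in second_heading_position)
--     n = len(starts)
--     best_diff = 0
--     best_pair = None
--     for pos, label in first_heading_position:
--         lo, hi = 0, n
--         while lo < hi: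
--             mid = (lo + hi) // 2
--             if starts[mid] <= pos:
--                 lo = mid + 1
--             else:
--                 hi = mid
--         if lo < n:
--             diff = starts[lo] - pos
--             if diff > best_diff and diff > 1000:
--                 best_diff = diff
--                 best_pair = (label, starts[lo])
--     return best_pair, None
-- ===== Notes on version B (the rewrite author's own statement) =====
-- stated objective: faster
-- what changed: Replaces the per-first-heading scan of all second headings (filter + min) with one sort of the second-heading starts followed by a binary search for the successor of each first-heading start.
import Mathlib
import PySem

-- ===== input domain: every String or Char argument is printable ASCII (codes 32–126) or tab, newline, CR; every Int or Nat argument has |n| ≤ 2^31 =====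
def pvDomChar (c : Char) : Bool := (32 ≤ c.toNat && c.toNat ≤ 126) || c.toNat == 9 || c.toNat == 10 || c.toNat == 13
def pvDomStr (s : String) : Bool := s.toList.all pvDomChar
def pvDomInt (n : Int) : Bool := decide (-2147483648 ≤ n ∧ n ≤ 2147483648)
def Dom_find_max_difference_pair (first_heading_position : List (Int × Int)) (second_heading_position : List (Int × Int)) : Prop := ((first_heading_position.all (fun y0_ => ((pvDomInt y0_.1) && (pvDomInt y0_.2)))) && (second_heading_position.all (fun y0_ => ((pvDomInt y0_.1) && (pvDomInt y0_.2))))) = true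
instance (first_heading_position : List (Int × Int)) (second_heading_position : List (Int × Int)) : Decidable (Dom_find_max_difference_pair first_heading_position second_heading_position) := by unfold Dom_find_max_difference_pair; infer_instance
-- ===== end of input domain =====

-- B sorts the second-heading start offsets once and binary-searches the successor of each
-- first-heading start, instead of A's per-first-heading filter+min scan (objective: faster).

-- ===== PORT A =====
def find_max_difference_pair (first_heading_position : List (Int × Int)) (second_heading_position : List (Int × Int)) : (Option (Int × Int)) × Option String :=
  let r := first_heading_position.foldl (fun acc first_heading =>
    let valid_second_headings := second_heading_position.filter (fun sh => first_heading.1 < sh.1)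
    match PySem.List.min? valid_second_headings (fun x => x.1) with
    | none => acc  -- 'if not valid_second_headings: continue'
    | some closest_start =>
      let difference := closest_start.1 - first_heading.1
      if difference > acc.1 ∧ difference > 1000 then
        (difference, some (first_heading.2, closest_start.1))
      else acc) ((0 : Int), (none : Option (Int × Int)))
  (r.2, none)  -- the try/except: no statement in the body can raise

-- ===== PORT B =====
-- hand-written bisect_right loop from Source B (lo, hi), recursion on hi - lo
def bsearchGT (starts : List Int) (pos : Int) (lo hi : Nat) : Nat :=
  if h : lo < hi then
    let mid := (lo + hi) / 2
    if starts.getD mid 0 ≤ pos then bsearchGT starts pos (mid + 1) hi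
    else bsearchGT starts pos lo mid
  else lo
termination_by hi - lo
decreasing_by all_goals omega

def find_max_difference_pair_alt (first_heading_position : List (Int × Int)) (second_heading_position : List (Int × Int)) : (Option (Int × Int)) × Option String :=
  let starts := PySem.List.sorted (second_heading_position.map Prod.fst) (fun x => x) false
  let n := starts.length
  let r := first_heading_position.foldl (fun acc p =>
    let lo := bsearchGT starts p.1 0 n
    if lo < n then
      let diff := starts.getD lo 0 - p.1
      if diff > acc.1 ∧ diff > 1000 then (diff, some (p.2, starts.getD lo 0))
      else acc
    else acc) ((0 : Int), (none : Option (Int × Int)))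
  (r.2, none)

-- ===== PRECONDITION & SPEC =====
def Spec_find_max_difference_pair (first_heading_position : List (Int × Int)) (second_heading_position : List (Int × Int)) (out : (Option (Int × Int)) × Option String) : Prop := out = find_max_difference_pair_alt first_heading_position second_heading_position
instance (first_heading_position : List (Int × Int)) (second_heading_position : List (Int × Int)) (out : (Option (Int × Int)) × Option String) : Decidable (Spec_find_max_difference_pair first_heading_position second_heading_position out) := by unfold Spec_find_max_difference_pair; infer_instance

-- ===== CLAIM (what is proved, stated in full; the proofs are below) =====
def Claim_equal_find_max_difference_pair : Prop := ∀ (first_heading_position : List (Int × Int)) (second_heading_position : List (Int × Int)), Dom_find_max_difference_pair first_heading_position second_heading_position → Spec_find_max_difference_pair first_heading_position second_heading_position (find_max_difference_pair first_heading_position second_heading_position)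

-- ===== LEMMAS AND PROOFS =====

-- binary-search invariant: everything left of the result is <= pos, everything from the result on is > pos
lemma getD_mono (starts : List Int) (hs : starts.Pairwise (· ≤ ·)) (i j : Nat)
    (hij : i ≤ j) (hj : j < starts.length) : starts.getD i 0 ≤ starts.getD j 0 := by
  rcases Nat.eq_or_lt_of_le hij with rfl | h
  · exact le_refl _
  · rw [List.getD_eq_getElem _ _ (lt_trans h hj), List.getD_eq_getElem _ _ hj]
    exact List.pairwise_iff_getElem.mp hs i j _ _ h

lemma bsearchGT_spec (starts : List Int) (pos : Int) (hs : starts.Pairwise (· ≤ ·))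
    (lo hi : Nat) (hhi : hi ≤ starts.length)
    (h1 : ∀ j, j < lo → j < starts.length → starts.getD j 0 ≤ pos)
    (h2 : ∀ j, hi ≤ j → j < starts.length → pos < starts.getD j 0) :
    (∀ j, j < bsearchGT starts pos lo hi → j < starts.length → starts.getD j 0 ≤ pos) ∧
    (∀ j, bsearchGT starts pos lo hi ≤ j → j < starts.length → pos < starts.getD j 0) := by
  fun_induction bsearchGT starts pos lo hi with
  | case1 lo hi h mid hle ih =>
    apply ih hhi
    · intro j hj hjl
      exact le_trans (getD_mono starts hs j mid (by omega) (by omega)) hle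
    · exact h2
  | case2 lo hi h mid hgt ih =>
    apply ih (by omega)
    · exact h1
    · intro j hj hjl
      exact lt_of_lt_of_le (lt_of_not_ge hgt) (getD_mono starts hs mid j hj hjl)
  | case3 lo hi h => exact ⟨h1, fun j hj => h2 j (by omega)⟩

lemma step_eq (second_heading_position : List (Int × Int)) (acc : Int × Option (Int × Int)) (p : Int × Int) :
    (let valid := second_heading_position.filter (fun sh => p.1 < sh.1)
     match PySem.List.min? valid (fun x => x.1) with
     | none => acc
     | some closest =>
       let difference := closest.1 - p.1
       if difference > acc.1 ∧ difference > 1000 then (difference, some (p.2, closest.1)) else acc)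
    =
    (let starts := PySem.List.sorted (second_heading_position.map Prod.fst) (fun x => x) false
     let lo := bsearchGT starts p.1 0 starts.length
     if lo < starts.length then
       let diff := starts.getD lo 0 - p.1
       if diff > acc.1 ∧ diff > 1000 then (diff, some (p.2, starts.getD lo 0)) else acc
     else acc) := by
  simp only
  set s := second_heading_position
  set pos := p.1
  set starts := PySem.List.sorted (s.map Prod.fst) (fun x => x) false with hstarts
  have hs : starts.Pairwise (· ≤ ·) := PySem.List.sorted_pairwise _ _
  have hperm : starts.Perm (s.map Prod.fst) := PySem.List.sorted_perm _ _ _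
  have hmem : ∀ v : Int, v ∈ starts ↔ v ∈ s.map Prod.fst := fun v => hperm.mem_iff
  set lo := bsearchGT starts pos 0 starts.length with hlo
  obtain ⟨P1, P2⟩ := bsearchGT_spec starts pos hs 0 starts.length (le_refl _)
    (by omega) (by omega)
  cases hmin : PySem.List.min? (s.filter (fun sh => pos < sh.1)) (fun x => x.1) with
  | none =>
    have hvalid : s.filter (fun sh => pos < sh.1) = [] :=
      (PySem.List.min?_eq_none_iff _ _).mp hmin
    have : ¬ lo < starts.length := by
      intro hlt
      have hgt : pos < starts.getD lo 0 := P2 lo (le_refl _) hlt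
      have hmem' : starts.getD lo 0 ∈ starts := by
        rw [List.getD_eq_getElem _ _ hlt]; exact List.getElem_mem _
      obtain ⟨sh, hsh, hsheq⟩ := List.mem_map.mp ((hmem _).mp hmem')
      have : sh ∈ s.filter (fun sh => pos < sh.1) :=
        List.mem_filter.mpr ⟨hsh, by simpa [hsheq] using hgt⟩
      simp [hvalid] at this
    rw [if_neg this]
  | some closest =>
    have hcmem := PySem.List.min?_mem hmin
    obtain ⟨hcs, hcgt⟩ := List.mem_filter.mp hcmem
    have hcgt : pos < closest.1 := by simpa using hcgt
    -- closest.1 occurs in starts at some index j ≥ lo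
    have hc_in : closest.1 ∈ starts := (hmem _).mpr (List.mem_map.mpr ⟨closest, hcs, rfl⟩)
    obtain ⟨j, hjlen, hj⟩ := List.mem_iff_getElem.mp hc_in
    have hjD : starts.getD j 0 = closest.1 := by rw [List.getD_eq_getElem _ _ hjlen, hj]
    have hjlo : lo ≤ j := by
      by_contra hl
      have := P1 j (by omega) hjlen
      omega
    have hlt : lo < starts.length := lt_of_le_of_lt hjlo hjlen
    rw [if_pos hlt]
    have heq : starts.getD lo 0 = closest.1 := by
      have hle1 : starts.getD lo 0 ≤ closest.1 := by
        rw [← hjD]; exact getD_mono starts hs lo j hjlo hjlen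
      have hloin : starts.getD lo 0 ∈ starts := by
        rw [List.getD_eq_getElem _ _ hlt]; exact List.getElem_mem _
      obtain ⟨sh, hsh, hsheq⟩ := List.mem_map.mp ((hmem _).mp hloin)
      have hshv : sh ∈ s.filter (fun sh => pos < sh.1) :=
        List.mem_filter.mpr ⟨hsh, by simpa [hsheq] using P2 lo (le_refl _) hlt⟩
      have := PySem.List.min?_isMin hmin sh hshv
      simp only at this
      omega
    rw [heq]

-- ===== VERDICT (by name: the statement is the Claim_ definition above) =====
theorem find_max_difference_pair_spec : Claim_equal_find_max_difference_pair := by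
  intro f s _
  unfold Spec_find_max_difference_pair find_max_difference_pair find_max_difference_pair_alt
  simp only
  apply congrArg (fun r => (Prod.snd r, (none : Option String)))
  apply PySem.List.foldl_congr_mem
  intro acc p _
  exact step_eq s acc p
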